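-- pv_equiv track=rewrite | github.com/miliar/Code_Jam_Webscraper | solutions_python/solutions_year15_round0_nr2/376.py | min_dining_time
-- ===== SOURCE A (Python) =====
-- def min_dining_time(diners):
--     min_time = 100000
--     for split_threshold in range(1, 1+max(diners)):
--         split_time = 0
--         for diner in diners:
--             while diner > split_threshold:
--                 diner -= split_threshold
--                 split_time += 1
--         min_time = min(split_time + split_threshold, min_time)
--     return min_time
-- ===== SOURCE B (Python) =====
-- def min_dining_time(diners):
--     best = 100000
--     for t in range(1, 1 + max(diners)):
--         best = min(best, t + sum((d - 1) // t for d in diners if d > t))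
--     return best
-- ===== Notes on version B (the rewrite author's own statement) =====
-- stated objective: faster
-- what changed: The inner repeated-subtraction while loop (one iteration per plateful) is replaced by the closed-form split count (d-1)//t for each diner above the threshold, computed in one pass with a generator sum.
import Mathlib
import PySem

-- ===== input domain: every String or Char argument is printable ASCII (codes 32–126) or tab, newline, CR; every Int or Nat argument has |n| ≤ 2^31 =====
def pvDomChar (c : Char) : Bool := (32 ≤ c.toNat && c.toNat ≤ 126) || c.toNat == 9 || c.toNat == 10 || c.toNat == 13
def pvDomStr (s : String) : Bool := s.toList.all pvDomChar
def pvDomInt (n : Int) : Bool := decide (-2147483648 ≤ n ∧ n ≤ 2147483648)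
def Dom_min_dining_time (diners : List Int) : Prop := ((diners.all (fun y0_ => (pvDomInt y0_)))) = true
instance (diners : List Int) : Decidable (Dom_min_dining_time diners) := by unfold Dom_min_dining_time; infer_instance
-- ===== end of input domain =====

-- B replaces A's inner repeated-subtraction loop by the closed-form split count (d-1)//t per diner (objective: faster).

-- ===== PORT A =====
-- 'while diner > split_threshold: diner -= split_threshold; split_time += 1' — count of iterations.
-- The guard 0 < t only makes the recursion total; every threshold A uses satisfies 1 ≤ t.
def pvWhileA (d t acc : Int) : Int :=
  if h : 0 < t ∧ t < d then pvWhileA (d - t) t (acc + 1) else acc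
termination_by d.toNat
decreasing_by omega

def min_dining_time (diners : List Int) : Int :=
  let m := ((PySem.List.max? diners (fun x => x)).getD 0)
  (PySem.List.pyRange 1 (1 + m) 1).foldl
    (fun min_time split_threshold =>
      let split_time := diners.foldl (fun s d => pvWhileA d split_threshold s) 0
      min (split_time + split_threshold) min_time) 100000

-- ===== PORT B =====
def min_dining_time_alt (diners : List Int) : Int :=
  let m := ((PySem.List.max? diners (fun x => x)).getD 0)
  (PySem.List.pyRange 1 (1 + m) 1).foldl
    (fun best t =>
      min best (t + ((diners.filter (fun d => t < d)).map
                      (fun d => PySem.Int.floordiv (d - 1) t)).sum)) 100000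

-- ===== PRECONDITION & SPEC =====
-- Pre_ excludes only the empty list, on which Python's max() raises ValueError (in A and in B alike).
def Pre_min_dining_time (diners : List Int) : Prop := diners ≠ []
instance (diners : List Int) : Decidable (Pre_min_dining_time diners) := by unfold Pre_min_dining_time; infer_instance
def pvWitness_min_dining_time : List Int := ([3, 1, 4])

def Spec_min_dining_time (diners : List Int) (out : Int) : Prop := out = min_dining_time_alt diners
instance (diners : List Int) (out : Int) : Decidable (Spec_min_dining_time diners out) := by unfold Spec_min_dining_time; infer_instance

-- ===== CLAIM (what is proved, stated in full; the proofs are below) =====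
def Claim_equal_min_dining_time : Prop := ∀ (diners : List Int), Dom_min_dining_time diners → Pre_min_dining_time diners → Spec_min_dining_time diners (min_dining_time diners)

-- ===== LEMMAS AND PROOFS =====

-- closed form for the subtraction loop (ediv; divisor positive)
theorem pvWhileA_closed (n : Nat) : ∀ d t acc : Int, d.toNat ≤ n → 0 < t →
    pvWhileA d t acc = acc + (if t < d then (d - 1) / t else 0) := by
  induction n with
  | zero =>
    intro d t acc hd ht
    rw [pvWhileA]
    have hnd : ¬ t < d := by omega
    simp [hnd, ht]
  | succ n ih =>
    intro d t acc hd ht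
    rw [pvWhileA]
    by_cases hlt : t < d
    · simp only [ht, hlt, and_self, dite_true, if_true]
      rw [ih (d - t) t (acc + 1) (by omega) ht]
      by_cases h2 : t < d - t
      · rw [if_pos h2]
        have h1 : d - 1 = (d - t - 1) + 1 * t := by ring
        rw [h1, Int.add_mul_ediv_right _ _ (by omega : t ≠ 0)]
        ring
      · rw [if_neg h2]
        have h1 : d - 1 = (d - 1 - t) + 1 * t := by ring
        rw [h1, Int.add_mul_ediv_right _ _ (by omega : t ≠ 0)]
        rw [Int.ediv_eq_zero_of_lt (by omega) (by omega)]
        ring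
    · simp [hlt]

theorem sum_counts_eq (t : Int) (ht : 0 < t) (l : List Int) :
    (l.map (fun d => if t < d then (d - 1) / t else 0)).sum
      = ((l.filter (fun d => t < d)).map (fun d => PySem.Int.floordiv (d - 1) t)).sum := by
  induction l with
  | nil => simp
  | cons d l ihl =>
    by_cases hd : t < d
    · simp only [List.map_cons, List.sum_cons, List.filter_cons, hd, decide_true, if_true]
      rw [ihl]
      simp [PySem.Int.floordiv_eq_ediv_of_pos ht]
    · simp only [List.map_cons, List.sum_cons, List.filter_cons, hd, decide_false]
      rw [ihl]
      simp

-- ===== VERDICT (by name: the statement is the Claim_ definition above) =====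
theorem min_dining_time_spec : Claim_equal_min_dining_time := by
  intro diners _ _
  unfold Spec_min_dining_time min_dining_time min_dining_time_alt
  apply PySem.List.foldl_congr_mem
  intro acc t hmem
  have ht : 0 < t := by
    have := (PySem.List.mem_pyRange_one.mp hmem).1
    omega
  dsimp only
  have hfold := PySem.List.foldl_congr_mem (l := diners)
      (fun s d => pvWhileA d t s)
      (fun s d => s + (if t < d then (d - 1) / t else 0)) 0
      (fun s d _ => pvWhileA_closed d.toNat d t s le_rfl ht)
  rw [hfold,
      PySem.List.foldl_add diners (fun d => if t < d then (d - 1) / t else 0) 0,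
      zero_add, sum_counts_eq t ht]
  rw [min_comm, add_comm]
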